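-- pv_equiv track=rewrite | github.com/SarunasJ-gif/Street-lights | main.py | forward_lights
-- ===== SOURCE A (Python) =====
-- def forward_lights(x, all_illuminations, not_working_street_lights: list[int]):
--     distance = 0
--     lights_to_check = list(range(x + 1, len(all_illuminations)))
--     all_in_list = all(item in not_working_street_lights for item in lights_to_check)
--     if all_in_list:
--         return 0
--     for i in range(x + 1, len(all_illuminations)):
--         distance += 20
--         if i not in not_working_street_lights:
--             break
--     return distance
-- ===== SOURCE B (Python) =====
-- def forward_lights(x, all_illuminations, not_working_street_lights: list[int]):
--     working = set(range(x + 1, len(all_illuminations))) - set(not_working_street_lights)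
--     if not working:
--         return 0
--     return 20 * (min(working) - x)
-- ===== Notes on version B (the rewrite author's own statement) =====
-- stated objective: simpler
-- what changed: Replaced A's two-phase all()-pre-scan followed by a counting break-loop with a single set difference (forward indices minus broken ones) and a closed-form 20*(min-x) on its minimum.
import Mathlib
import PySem

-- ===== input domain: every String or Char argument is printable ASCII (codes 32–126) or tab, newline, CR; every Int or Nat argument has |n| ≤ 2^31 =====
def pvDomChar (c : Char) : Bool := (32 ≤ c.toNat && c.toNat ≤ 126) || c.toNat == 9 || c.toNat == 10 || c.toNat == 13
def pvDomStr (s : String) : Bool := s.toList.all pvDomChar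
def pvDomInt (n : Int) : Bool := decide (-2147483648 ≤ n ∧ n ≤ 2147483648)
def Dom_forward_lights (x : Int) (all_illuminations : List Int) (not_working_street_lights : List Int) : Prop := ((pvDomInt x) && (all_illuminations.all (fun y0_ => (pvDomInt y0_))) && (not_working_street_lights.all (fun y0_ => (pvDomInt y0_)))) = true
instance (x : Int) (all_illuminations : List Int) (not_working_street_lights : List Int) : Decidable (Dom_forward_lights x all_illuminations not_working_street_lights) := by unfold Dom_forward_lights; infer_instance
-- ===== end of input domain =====

-- B replaces A's all()-pre-scan plus counting break-loop by a set difference and a closed-form 20*(min-x): simpler, one traversal shape.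


-- ===== PORT A =====
-- the 'for i in range(...): distance += 20; if i not in nw: break' loop
def pvLoopA (nw : List Int) : List Int → Int → Int
  | [], distance => distance
  | i :: rest, distance =>
    let distance := distance + 20
    if !(nw.contains i) then distance else pvLoopA nw rest distance

def forward_lights (x : Int) (all_illuminations : List Int) (not_working_street_lights : List Int) : Int :=
  let lights_to_check := PySem.List.pyRange (x + 1) (PySem.List.len all_illuminations) 1
  let all_in_list := lights_to_check.all (fun item => not_working_street_lights.contains item)
  if all_in_list then 0
  else pvLoopA not_working_street_lights (PySem.List.pyRange (x + 1) (PySem.List.len all_illuminations) 1) 0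

-- ===== PORT B =====
-- set(range(x+1, len(all))) - set(nw); min over a set of ints is order-independent, ported as List.min?
def forward_lights_alt (x : Int) (all_illuminations : List Int) (not_working_street_lights : List Int) : Int :=
  let working : PySem.Set Int :=
    PySem.Set.diff (PySem.Set.ofList (PySem.List.pyRange (x + 1) (PySem.List.len all_illuminations) 1))
                   (PySem.Set.ofList not_working_street_lights)
  match PySem.List.min? working (fun i => i) with
  | none => 0
  | some m => 20 * (m - x)

-- ===== PRECONDITION & SPEC =====
def Spec_forward_lights (x : Int) (all_illuminations : List Int) (not_working_street_lights : List Int) (out : Int) : Prop := out = forward_lights_alt x all_illuminations not_working_street_lights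
instance (x : Int) (all_illuminations : List Int) (not_working_street_lights : List Int) (out : Int) : Decidable (Spec_forward_lights x all_illuminations not_working_street_lights out) := by unfold Spec_forward_lights; infer_instance

-- ===== CLAIM (what is proved, stated in full; the proofs are below) =====
def Claim_equal_forward_lights : Prop := ∀ (x : Int) (all_illuminations : List Int) (not_working_street_lights : List Int), Dom_forward_lights x all_illuminations not_working_street_lights → Spec_forward_lights x all_illuminations not_working_street_lights (forward_lights x all_illuminations not_working_street_lights)

-- ===== LEMMAS AND PROOFS =====

theorem pvAdd_of_not_mem {α : Type} [BEq α] [LawfulBEq α] (s : PySem.Set α) (x : α) (h : x ∉ s) :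
    PySem.Set.add s x = s ++ [x] := by
  simp [PySem.Set.add, h]

theorem pvFoldl_add_nodup {α : Type} [BEq α] [LawfulBEq α] :
    ∀ (xs s : List α), xs.Nodup → (∀ y ∈ xs, y ∉ s) →
      xs.foldl PySem.Set.add s = s ++ xs := by
  intro xs
  induction xs with
  | nil => intro s _ _; simp
  | cons x t ih =>
    intro s hnd hdis
    have hx : x ∉ s := hdis x (by simp)
    rw [List.foldl_cons, pvAdd_of_not_mem s x hx,
        ih (s ++ [x]) hnd.of_cons]
    · simp
    · intro y hy
      simp only [List.mem_append, List.mem_singleton]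
      rintro (h | rfl)
      · exact hdis y (by simp [hy]) h
      · exact (List.nodup_cons.mp hnd).1 hy

theorem pvOfList_nodup {α : Type} [BEq α] [LawfulBEq α] (xs : List α) (h : xs.Nodup) :
    PySem.Set.ofList xs = xs := by
  have := pvFoldl_add_nodup xs [] h (by simp)
  simpa [PySem.Set.ofList, PySem.Set.empty] using this

theorem pvContains_ofList (nw : List Int) (i : Int) :
    PySem.Set.contains (PySem.Set.ofList nw) i = nw.contains i := by
  cases hc : nw.contains i
  · have : i ∉ nw := by simpa using hc
    cases hs : PySem.Set.contains (PySem.Set.ofList nw) i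
    · rfl
    · exact absurd ((PySem.Set.mem_ofList nw i).mp ((PySem.Set.contains_iff _ i).mp hs)) this
  · have : i ∈ nw := by simpa using hc
    exact (PySem.Set.contains_iff _ i).mpr ((PySem.Set.mem_ofList nw i).mpr this)

-- A's break-loop on a range whose first working index is w returns d + 20*(w - a + 1)
theorem pvLoopA_eq :
    ∀ (n : ℕ) (a b : Int), (b - a).toNat = n → ∀ (nw : List Int) (d w : Int) (ws : List Int),
      (PySem.List.pyRange a b 1).filter (fun i => !(nw.contains i)) = w :: ws →
      pvLoopA nw (PySem.List.pyRange a b 1) d = d + 20 * (w - a + 1) := by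
  intro n
  induction n with
  | zero =>
    intro a b hn nw d w ws hf
    rw [PySem.List.pyRange_one_eq_nil (by omega)] at hf
    simp at hf
  | succ k ih =>
    intro a b hn nw d w ws hf
    have hab : a < b := by omega
    rw [PySem.List.pyRange_one_cons hab] at hf ⊢
    cases hc : nw.contains a
    · -- a is working: loop stops at first step, filter head is a
      rw [List.filter_cons_of_pos (by rw [hc]; rfl)] at hf
      have hw : w = a := (List.cons.injEq _ _ _ _ ▸ hf).1.symm
      subst hw
      simp only [pvLoopA, hc, Bool.not_false, if_pos]
      ring
    · -- a is broken: recurse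
      rw [List.filter_cons_of_neg (by rw [hc]; simp)] at hf
      have hrec := ih (a + 1) b (by omega) nw (d + 20) w ws hf
      simp only [pvLoopA, hc, Bool.not_true, Bool.false_eq_true, if_false]
      rw [hrec]
      ring

theorem pvFoldl_min_eq_self : ∀ (t : List Int) (x : Int), (∀ y ∈ t, x ≤ y) → t.foldl min x = x := by
  intro t
  induction t with
  | nil => intro x _; rfl
  | cons y t ih =>
    intro x h
    rw [List.foldl_cons, min_eq_left (h y (by simp))]
    exact ih x (fun z hz => h z (by simp [hz]))

theorem pvMin?_sorted (xs : List Int) (h : xs.Pairwise (· < ·)) :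
    PySem.List.min? xs (fun i => i) = xs.head? := by
  cases xs with
  | nil => rfl
  | cons x t =>
    rw [PySem.List.min?_id_cons]
    have : t.foldl min x = x :=
      pvFoldl_min_eq_self t x (fun y hy => le_of_lt ((List.pairwise_cons.mp h).1 y hy))
    simp [this]

theorem forward_lights_agree (x : Int) (all_illuminations : List Int) (nw : List Int) :
    forward_lights x all_illuminations nw = forward_lights_alt x all_illuminations nw := by
  unfold forward_lights forward_lights_alt
  set a := x + 1 with ha
  set b := PySem.List.len all_illuminations with hb
  have hofl : PySem.Set.ofList (PySem.List.pyRange a b 1) = PySem.List.pyRange a b 1 :=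
    pvOfList_nodup _ (PySem.List.nodup_pyRange_one a b)
  have hdiff : PySem.Set.diff (PySem.Set.ofList (PySem.List.pyRange a b 1)) (PySem.Set.ofList nw)
      = (PySem.List.pyRange a b 1).filter (fun i => !(nw.contains i)) := by
    rw [PySem.Set.diff, hofl]
    exact List.filter_congr (fun i _ => by rw [pvContains_ofList])
  simp only [hdiff]
  have hmin : PySem.List.min? ((PySem.List.pyRange a b 1).filter (fun i => !(nw.contains i))) (fun i => i)
      = ((PySem.List.pyRange a b 1).filter (fun i => !(nw.contains i))).head? :=
    pvMin?_sorted _ (List.Pairwise.filter _ (PySem.List.pairwise_lt_pyRange_one a b))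
  rw [hmin]
  cases hf : (PySem.List.pyRange a b 1).filter (fun i => !(nw.contains i)) with
  | nil =>
    have hall : (PySem.List.pyRange a b 1).all (fun item => nw.contains item) = true := by
      rw [List.all_eq_true]
      intro i hi
      by_contra hc
      have hmem : i ∈ (PySem.List.pyRange a b 1).filter (fun j => !(nw.contains j)) :=
        List.mem_filter.mpr ⟨hi, by simpa using hc⟩
      rw [hf] at hmem
      simp at hmem
    rw [if_pos hall]
    rfl
  | cons w ws =>
    have hall : (PySem.List.pyRange a b 1).all (fun item => nw.contains item) = false := by
      by_contra hc
      have hall' : ∀ i ∈ PySem.List.pyRange a b 1, nw.contains i = true := by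
        rw [← List.all_eq_true]
        cases h2 : (PySem.List.pyRange a b 1).all (fun item => nw.contains item)
        · exact absurd h2 hc
        · rfl
      have hw : w ∈ (PySem.List.pyRange a b 1).filter (fun j => !(nw.contains j)) := by
        rw [hf]; exact List.mem_cons_self
      have hmf := List.mem_filter.mp hw
      have h2 := hmf.2
      rw [hall' w hmf.1] at h2
      simp at h2
    simp only [hall, Bool.false_eq_true, if_false, List.head?_cons]
    have hloop := pvLoopA_eq ((b - a).toNat) a b rfl nw 0 w ws hf
    rw [hloop]
    ring

-- ===== VERDICT (by name: the statement is the Claim_ definition above) =====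
theorem forward_lights_spec : Claim_equal_forward_lights := by
  intro x all nw _
  exact forward_lights_agree x all nw
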